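-- pv_equiv track=rewrite | github.com/adbrower/maya_script | Adbrower/adb_core/NameConv_utils.py | getNameSpace
-- ===== SOURCE A (Python) =====
-- def getNameSpace(_name):
--     """
--     @param _name: (string)
--     """
--     nameSplit = _name.split(':')
--     nameSpace = ''
--     for elem in nameSplit[:-1]:
--         nameSpace = nameSpace + elem + ':'
--
--     if nameSpace == '':
--         nameSpace = ':'
--
--     return nameSpace
-- ===== SOURCE B (Python) =====
-- def getNameSpace(_name):
--     idx = _name.rfind(':')
--     if idx != -1:
--         return _name[:idx + 1]
--     return ':'
-- ===== Notes on version B (the rewrite author's own statement) =====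
-- stated objective: idiomatic
-- what changed: Instead of splitting on ':' into a list and re-concatenating all segments but the last in a loop, B locates the last colon with rfind and returns the single slice up to and including it (':' when there is none).
import Mathlib
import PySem

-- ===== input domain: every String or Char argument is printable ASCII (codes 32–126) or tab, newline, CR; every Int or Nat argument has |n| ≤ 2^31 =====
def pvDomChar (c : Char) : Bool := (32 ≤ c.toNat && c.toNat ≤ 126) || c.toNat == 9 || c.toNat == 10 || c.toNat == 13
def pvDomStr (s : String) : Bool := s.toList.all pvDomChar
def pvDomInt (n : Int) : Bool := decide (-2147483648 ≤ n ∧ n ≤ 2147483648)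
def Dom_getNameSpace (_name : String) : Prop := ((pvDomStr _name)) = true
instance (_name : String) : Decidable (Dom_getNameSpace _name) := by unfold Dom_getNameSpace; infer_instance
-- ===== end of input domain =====

-- B replaces A's split-into-list-and-reconcatenate loop by a single rfind plus one slice (idiomatic; same O(n) cost).

-- ===== PORT A =====
-- transliteration of Source A on code points: split(':'), loop over all but the last piece
-- rebuilding 'nameSpace = nameSpace + elem + ":"', then the empty-string fixup.
def getNameSpace (_name : String) : String :=
  let nameSplit : List (List Char) := PySem.Chars.splitOn _name.toList [':']
  let nameSpace : List Char :=
    (PySem.List.slice nameSplit none (some (-1))).foldl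
      (fun acc elem => acc ++ elem ++ [':']) []
  if nameSpace = [] then ":" else String.ofList nameSpace

-- ===== PORT B =====
-- transliteration of Source B: idx = _name.rfind(':'); _name[:idx+1] if idx != -1 else ':'.
def getNameSpace_alt (_name : String) : String :=
  let idx : Int := PySem.Str.rfind _name ":"
  if idx ≠ -1 then PySem.Str.slice _name none (some (idx + 1)) else ":"

-- ===== PRECONDITION & SPEC =====
def Spec_getNameSpace (_name : String) (out : String) : Prop := out = getNameSpace_alt _name
instance (_name : String) (out : String) : Decidable (Spec_getNameSpace _name out) := by unfold Spec_getNameSpace; infer_instance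

-- ===== CLAIM (what is proved, stated in full; the proofs are below) =====
def Claim_equal_getNameSpace : Prop := ∀ (_name : String), Dom_getNameSpace _name → Spec_getNameSpace _name (getNameSpace _name)

-- ===== LEMMAS AND PROOFS =====

-- index of the last ':' in a list of chars, as a cons-recursion (none = no colon)
def pvLC : List Char → Option Nat
  | [] => none
  | c :: rest =>
    match pvLC rest with
    | some k => some (k + 1)
    | none => if c = ':' then some 0 else none

-- split on ':' as a cons-recursion
def pvSplitC : List Char → List (List Char)
  | [] => [[]]
  | c :: rest =>
    if c = ':' then [] :: pvSplitC rest
    else ((pvSplitC rest).headD []).cons c :: (pvSplitC rest).tail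

theorem pvSplitC_ne_nil (cs : List Char) : pvSplitC cs ≠ [] := by
  cases cs with
  | nil => simp [pvSplitC]
  | cons c rest => by_cases h : c = ':' <;> simp [pvSplitC, h]

theorem pvLC_none_iff (cs : List Char) : pvLC cs = none ↔ ':' ∉ cs := by
  induction cs with
  | nil => simp [pvLC]
  | cons c rest ih =>
    simp only [pvLC, List.mem_cons]
    cases h : pvLC rest with
    | some k =>
      rw [h] at ih
      have hm : ':' ∈ rest := by
        by_contra hm
        have := ih.mpr hm
        simp at this
      simp [hm]
    | none =>
      have hnr : ':' ∉ rest := ih.mp h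
      by_cases hc : c = ':'
      · simp [hc]
      · simp only [if_neg hc]
        constructor
        · intro _
          rintro (e | m)
          · exact hc e.symm
          · exact hnr m
        · intro _; trivial

theorem pvSplitC_no_colon (cs : List Char) (h : ':' ∉ cs) : pvSplitC cs = [cs] := by
  induction cs with
  | nil => rfl
  | cons c rest ih =>
    have hc : c ≠ ':' := fun e => h (by simp [e])
    have := ih (fun m => h (List.mem_cons_of_mem _ m))
    simp [pvSplitC, hc, this]

theorem pvSplitC_two_le (cs : List Char) (h : ':' ∈ cs) : 2 ≤ (pvSplitC cs).length := by
  induction cs with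
  | nil => simp at h
  | cons c rest ih =>
    by_cases hc : c = ':'
    · have hp := List.length_pos_of_ne_nil (pvSplitC_ne_nil rest)
      simp [pvSplitC, hc]
      omega
    · have hm : ':' ∈ rest := by
        rcases List.mem_cons.mp h with e | m
        · exact absurd e.symm hc
        · exact m
      have h2 := ih hm
      obtain ⟨x, l, e⟩ := List.exists_cons_of_ne_nil (pvSplitC_ne_nil rest)
      simp only [pvSplitC, if_neg hc, e, List.headD_cons, List.tail_cons]
      simp only [e, List.length_cons] at h2 ⊢
      omega

-- PySem's splitOn.go with single-char separator, enough fuel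
theorem pvGo (l : List Char) : ∀ (fuel : Nat) (cur : List Char) (acc : List (List Char)),
    l.length < fuel →
    PySem.Chars.splitOn.go [':'] fuel l cur acc
      = acc.reverse ++ (pvSplitC l).modifyHead (cur.reverse ++ ·) := by
  induction l with
  | nil =>
    intro fuel cur acc hf
    match fuel, hf with
    | fuel + 1, _ => simp [PySem.Chars.splitOn.go, pvSplitC]
  | cons c rest ih =>
    intro fuel cur acc hf
    match fuel, hf with
    | fuel + 1, hf =>
      by_cases hc : c = ':'
      · have hpre : List.isPrefixOf [':'] (c :: rest) = true := by simp [List.isPrefixOf, hc]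
        rw [PySem.Chars.splitOn.go, if_pos hpre]
        have hdrop : List.drop [':'].length (c :: rest) = rest := by simp
        rw [hdrop, ih fuel [] (cur.reverse :: acc) (by simpa using Nat.lt_of_succ_lt_succ hf)]
        simp only [pvSplitC, if_pos hc, List.reverse_cons, List.reverse_nil, List.nil_append,
          List.modifyHead_cons, List.append_assoc, List.cons_append, List.nil_append]
        cases hsp : pvSplitC rest <;> simp
      · have hpre : List.isPrefixOf [':'] (c :: rest) = false := by
          simp [List.isPrefixOf]
          exact fun e => hc e.symm
        rw [PySem.Chars.splitOn.go, if_neg (by simp [hpre])]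
        rw [ih fuel (c :: cur) acc (by simpa using Nat.lt_of_succ_lt_succ hf)]
        obtain ⟨x, l, e⟩ := List.exists_cons_of_ne_nil (pvSplitC_ne_nil rest)
        simp [pvSplitC, hc, e]

theorem pvSplitOn_eq (cs : List Char) : PySem.Chars.splitOn cs [':'] = pvSplitC cs := by
  rw [PySem.Chars.splitOn, pvGo cs (cs.length + 1) [] [] (Nat.lt_succ_self _)]
  simp
  cases h : pvSplitC cs with
  | nil => exact absurd h (pvSplitC_ne_nil cs)
  | cons x l => simp

-- A's fold value characterised by the last-colon index
theorem pvFoldChar (cs : List Char) :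
    (pvSplitC cs).dropLast.flatMap (fun e => e ++ [':'])
      = (match pvLC cs with
         | some k => cs.take (k + 1)
         | none => []) := by
  induction cs with
  | nil => simp [pvSplitC, pvLC]
  | cons c rest ih =>
    cases h : pvLC rest with
    | some k =>
      have hm : ':' ∈ rest := by
        by_contra hmem
        rw [← pvLC_none_iff, h] at hmem
        simp at hmem
      obtain ⟨x, l, e⟩ := List.exists_cons_of_ne_nil (pvSplitC_ne_nil rest)
      have h2 := pvSplitC_two_le rest hm
      rw [e] at h2; simp at h2
      have hl : l ≠ [] := by intro e'; rw [e'] at h2; simp at h2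
      by_cases hc : c = ':'
      · simp only [pvSplitC, if_pos hc, pvLC, h]
        rw [List.dropLast_cons_of_ne_nil (pvSplitC_ne_nil rest)]
        simp [ih, h, hc]
      · simp only [pvSplitC, if_neg hc, pvLC, h, e]
        simp only [List.headD_cons, List.tail_cons]
        rw [List.dropLast_cons_of_ne_nil hl]
        have ih' := ih
        rw [e, List.dropLast_cons_of_ne_nil hl, h] at ih'
        simp only [List.flatMap_cons] at ih' ⊢
        simp at ih' ⊢
        rw [ih']
    | none =>
      have hmem : ':' ∉ rest := (pvLC_none_iff rest).mp h
      by_cases hc : c = ':'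
      · simp [pvSplitC, hc, pvLC, h, pvSplitC_no_colon rest hmem]
      · simp [pvSplitC, hc, pvLC, h, pvSplitC_no_colon rest hmem]

-- rfind with single-char needle, shift lemma
theorem pvGoShift (c : Char) (rest : List Char) : ∀ j : Nat,
    PySem.Chars.rfind.go (c :: rest) [':'] (j + 1)
      = (if 0 ≤ PySem.Chars.rfind.go rest [':'] j
         then PySem.Chars.rfind.go rest [':'] j + 1
         else if c = ':' then 0 else -1) := by
  intro j
  induction j with
  | zero =>
    have hcp : List.isPrefixOf [':'] (c :: rest) = (c == ':') := by
      simp [List.isPrefixOf, eq_comm]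
    rw [PySem.Chars.rfind.go, PySem.Chars.rfind.go, PySem.Chars.rfind.go]
    by_cases hp : List.isPrefixOf [':'] rest = true
    · simp [hp]
    · have hp' : List.isPrefixOf [':'] rest = false := eq_false_of_ne_true hp
      by_cases hc : c = ':' <;> simp [hcp, hc, hp']
  | succ j ih =>
    rw [PySem.Chars.rfind.go]
    conv_rhs => rw [PySem.Chars.rfind.go]
    have hd : List.drop (j + 1 + 1) (c :: rest) = List.drop (j + 1) rest := by simp
    rw [hd]
    by_cases hp : List.isPrefixOf [':'] (List.drop (j + 1) rest) = true
    · rw [if_pos hp, if_pos hp, if_pos (by positivity)]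
      push_cast; ring
    · simp only [eq_false_of_ne_true hp, Bool.false_eq_true, if_false, ih]

-- rfind never returns below -1 … we only need: it is -1 or ≥ 0, via pvLC
theorem pvRfind_eq (cs : List Char) :
    PySem.Chars.rfind cs [':'] = (match pvLC cs with
      | some k => (k : Int)
      | none => -1) := by
  induction cs with
  | nil => rw [PySem.Chars.rfind]; simp [PySem.Chars.rfind.go, List.isPrefixOf, pvLC]
  | cons c rest ih =>
    rw [PySem.Chars.rfind]
    have : (c :: rest).length = rest.length + 1 := by simp
    rw [this, pvGoShift c rest rest.length]
    rw [PySem.Chars.rfind] at ih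
    rw [ih]
    cases h : pvLC rest with
    | some k => simp [pvLC, h]
    | none =>
      by_cases hc : c = ':' <;> simp [pvLC, h, hc]

theorem pvLC_lt (cs : List Char) : ∀ k, pvLC cs = some k → k < cs.length := by
  induction cs with
  | nil => intro k h; rw [pvLC.eq_def] at h; simp at h
  | cons c rest ih =>
    intro k h
    rw [pvLC.eq_def] at h
    simp only [] at h
    cases h' : pvLC rest with
    | some m =>
      rw [h'] at h
      simp only [Option.some.injEq] at h
      have := ih m h'
      simp only [List.length_cons]
      omega
    | none =>
      rw [h'] at h
      by_cases hc : c = ':'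
      · rw [if_pos hc] at h
        simp only [Option.some.injEq] at h
        simp only [List.length_cons]
        omega
      · rw [if_neg hc] at h
        exact absurd h (by simp)

-- ===== VERDICT (by name: the statement is the Claim_ definition above) =====
theorem getNameSpace_spec : Claim_equal_getNameSpace := by
  intro _name _hd
  unfold Spec_getNameSpace
  simp only [getNameSpace, getNameSpace_alt]
  rw [PySem.Str.rfind_eq]
  have hts : (":" : String).toList = [':'] := rfl
  rw [hts]
  have hr := pvRfind_eq _name.toList
  have hfold :
      (PySem.List.slice (PySem.Chars.splitOn _name.toList [':']) none (some (-1))).foldl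
        (fun acc elem => acc ++ elem ++ [':']) []
      = (match pvLC _name.toList with
         | some k => _name.toList.take (k + 1)
         | none => []) := by
    rw [pvSplitOn_eq, PySem.List.slice_to_neg_one]
    have : ∀ (l : List (List Char)) (acc : List Char),
        l.foldl (fun acc elem => acc ++ elem ++ [':']) acc
          = acc ++ l.flatMap (fun e => e ++ [':']) := by
      intro l
      induction l with
      | nil => simp
      | cons x t iht => intro acc; simp [List.foldl_cons, List.append_assoc, List.flatMap_def]
    rw [this]
    simpa using pvFoldChar _name.toList
  rw [hfold]
  cases h : pvLC _name.toList with
  | none =>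
    have hrn : PySem.Chars.rfind _name.toList [':'] = -1 := by rw [hr, h]
    rw [hrn]; simp
  | some k =>
    have hrk : PySem.Chars.rfind _name.toList [':'] = (k : Int) := by rw [hr, h]
    rw [hrk]
    have hkl : k < _name.toList.length := pvLC_lt _name.toList k h
    have hne : _name.toList.take (k + 1) ≠ [] := by
      intro e
      rcases List.take_eq_nil_iff.mp e with h0 | h0
      · omega
      · rw [h0] at hkl; simp at hkl
    rw [if_neg hne, if_pos (show (k : Int) ≠ -1 by omega)]
    apply String.toList_inj.mp
    rw [PySem.Str.toList_slice]
    have hcast : ((k : Int) + 1) = ((k + 1 : Nat) : Int) := by push_cast; ring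
    rw [hcast]
    simp only [PySem.Chars.slice_eq_listSlice]
    rw [PySem.List.slice_to_natCast, String.toList_ofList]
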